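-- pv_equiv track=rewrite | github.com/actumn/problem-solving | programmers/level3/예산/diff_solution.py | solution
-- ===== SOURCE A (Python) =====
-- def solution(budgets, M):
--     n = len(budgets)
--     sum_budgets = sum(budgets)
--
--
--     min_bound = 0
--     max_bound = max(budgets)
--     answer = 0
--     while min_bound <= max_bound:
--         sum_budgets = 0
--         restrict = (min_bound + max_bound) // 2
--         for budget in budgets:
--             sum_budgets += min(restrict, budget)
--
--         if sum_budgets <= M:
--             answer = restrict
--             min_bound = restrict + 1
--         elif sum_budgets > M:
--             max_bound = restrict - 1
--
--     return answer
-- ===== SOURCE B (Python) =====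
-- def solution(budgets, M):
--     s = sorted(budgets)
--     n = len(s)
--     cap = s[-1]
--     pre = 0
--     for i, b in enumerate(s):
--         if pre + b * (n - i) > M:
--             cap = (M - pre) // (n - i)
--             break
--         pre += b
--     return max(cap, 0)
-- ===== Notes on version B (the rewrite author's own statement) =====
-- stated objective: faster
-- what changed: Replaces A's binary search over the cap value (recomputing the capped sum of the whole list each probe) by sorting the budgets once and solving the piecewise-linear cap equation in a single pass with a running prefix sum; the empty list, on which both raise, is excluded by Pre_.
import Mathlib
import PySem

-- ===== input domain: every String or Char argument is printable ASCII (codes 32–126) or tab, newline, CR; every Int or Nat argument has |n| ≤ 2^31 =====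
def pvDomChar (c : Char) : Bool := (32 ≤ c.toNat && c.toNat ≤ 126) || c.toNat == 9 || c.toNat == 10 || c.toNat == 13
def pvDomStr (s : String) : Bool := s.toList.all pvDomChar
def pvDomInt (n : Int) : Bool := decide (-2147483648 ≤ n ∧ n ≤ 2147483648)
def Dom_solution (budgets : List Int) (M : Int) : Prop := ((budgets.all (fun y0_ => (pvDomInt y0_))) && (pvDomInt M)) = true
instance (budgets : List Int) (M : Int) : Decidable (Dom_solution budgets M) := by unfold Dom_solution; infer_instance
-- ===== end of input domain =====

-- B sorts the budgets once and solves the piecewise-linear cap equation on one pass over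
-- the sorted list (O(n log n)) instead of A's binary search over the cap value; exact same result.


-- ===== PORT A =====
-- the while-loop of A: state (min_bound, max_bound, answer)
def solGo (budgets : List Int) (M : Int) (lo hi ans : Int) : Int :=
  if h : lo ≤ hi then
    let restrict := PySem.Int.floordiv (lo + hi) 2
    let s := budgets.foldl (fun acc b => acc + min restrict b) 0
    if s ≤ M then solGo budgets M (restrict + 1) hi restrict
    else solGo budgets M lo (restrict - 1) ans
  else ans
termination_by (hi + 1 - lo).toNat
decreasing_by
  · have := PySem.Int.floordiv_two_mid_bounds h
    omega
  · have := PySem.Int.floordiv_two_mid_bounds h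
    omega

def solution (budgets : List Int) (M : Int) : Int :=
  let _n : Int := budgets.length
  let _sum_budgets := budgets.foldl (· + ·) 0   -- dead store in A, kept literally
  match PySem.List.max? budgets (fun x => x) with
  | none => 0            -- Python raises ValueError on max([]); excluded by Pre_solution
  | some mx => solGo budgets M 0 mx 0

-- ===== PORT B =====
-- the for-loop of B over the sorted list, carrying index i, prefix sum pre, and cap
def altGo (M n : Int) : List Int → Int → Int → Int → Int
  | [], _, _, cap => cap
  | b :: rest, i, pre, cap =>
    if M < pre + b * (n - i) then PySem.Int.floordiv (M - pre) (n - i)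
    else altGo M n rest (i + 1) (pre + b) cap

def solution_alt (budgets : List Int) (M : Int) : Int :=
  let s := PySem.List.sorted budgets (fun x => x) false
  let n : Int := s.length
  match PySem.List.pyGet? s (-1) with
  | none => 0            -- s[-1] raises IndexError on []; excluded by Pre_solution
  | some last => max (altGo M n s 0 0 last) 0

-- ===== PRECONDITION & SPEC =====
-- A raises ValueError (max of empty sequence) and B raises IndexError on budgets = []; excluded.
def Pre_solution (budgets : List Int) (M : Int) : Prop := budgets ≠ []
instance (budgets : List Int) (M : Int) : Decidable (Pre_solution budgets M) := by
  unfold Pre_solution; infer_instance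
def pvWitness_solution : List Int × Int := ([1, 3, 2, 5], 9)

def Spec_solution (budgets : List Int) (M : Int) (out : Int) : Prop := out = solution_alt budgets M
instance (budgets : List Int) (M : Int) (out : Int) : Decidable (Spec_solution budgets M out) := by
  unfold Spec_solution; infer_instance

-- ===== CLAIM (what is proved, stated in full; the proofs are below) =====
def Claim_equal_solution : Prop := ∀ (budgets : List Int) (M : Int), Dom_solution budgets M → Pre_solution budgets M → Spec_solution budgets M (solution budgets M)

-- ===== LEMMAS AND PROOFS =====

-- capSum bs r = sum(min(r, b) for b in bs), the capped total
def capSum (bs : List Int) (r : Int) : Int := (bs.map (fun b => min r b)).sum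

theorem foldl_capSum (bs : List Int) (r : Int) :
    bs.foldl (fun acc b => acc + min r b) 0 = capSum bs r := by
  suffices h : ∀ init, bs.foldl (fun acc b => acc + min r b) init = init + capSum bs r by
    simpa using h 0
  induction bs with
  | nil => intro init; simp [capSum]
  | cons b t ih => intro init; simp [List.foldl_cons, ih, capSum]; ring

theorem capSum_mono (bs : List Int) {r r' : Int} (h : r ≤ r') : capSum bs r ≤ capSum bs r' := by
  unfold capSum
  induction bs with
  | nil => simp
  | cons b t ih =>
    simp only [List.map_cons, List.sum_cons]
    have : min r b ≤ min r' b := by omega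
    omega

theorem capSum_perm {bs cs : List Int} (h : bs.Perm cs) (r : Int) : capSum bs r = capSum cs r :=
  (h.map _).sum_eq

theorem capSum_split (done rest : List Int) (r : Int)
    (hd : ∀ d ∈ done, d ≤ r) (hr : ∀ e ∈ rest, r ≤ e) :
    capSum (done ++ rest) r = done.sum + r * rest.length := by
  unfold capSum
  rw [List.map_append, List.sum_append]
  have h1 : ∀ (l : List Int), (∀ d ∈ l, d ≤ r) → l.map (fun b => min r b) = l := by
    intro l
    induction l with
    | nil => simp
    | cons d t ih =>
      intro hl
      simp only [List.map_cons]
      rw [min_eq_right (hl d (by simp)), ih (fun x hx => hl x (by simp [hx]))]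
  have h2 : ∀ (l : List Int), (∀ e ∈ l, r ≤ e) → (l.map (fun b => min r b)).sum = r * l.length := by
    intro l
    induction l with
    | nil => simp
    | cons e t ih =>
      intro hl
      simp only [List.map_cons, List.sum_cons, List.length_cons]
      rw [min_eq_left (hl e (by simp)), ih (fun x hx => hl x (by simp [hx]))]
      push_cast; ring
  rw [h1 done hd, h2 rest hr]

-- the characterisation of A's loop: a is the largest cap in [0, mx] keeping capSum ≤ M (or 0)
def IsAns (bs : List Int) (M mx a : Int) : Prop :=
  0 ≤ a ∧ a ≤ mx ∧ (capSum bs a ≤ M ∨ a = 0) ∧ (a = mx ∨ M < capSum bs (a + 1))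

-- the characterisation of B's loop, before the final clamp at 0
def Unc (bs : List Int) (M mx t : Int) : Prop :=
  t ≤ mx ∧ capSum bs t ≤ M ∧ (t = mx ∨ M < capSum bs (t + 1))

theorem isAns_unique {bs : List Int} {M mx a a' : Int}
    (h : IsAns bs M mx a) (h' : IsAns bs M mx a') : a = a' := by
  obtain ⟨h0, h1, h2, h3⟩ := h
  obtain ⟨h0', h1', h2', h3'⟩ := h'
  by_contra hne
  rcases lt_or_gt_of_ne hne with hlt | hlt
  · have hg : capSum bs a' ≤ M := by
      rcases h2' with h | h
      · exact h
      · omega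
    rcases h3 with h | h
    · omega
    · have := capSum_mono bs (show a + 1 ≤ a' by omega)
      omega
  · have hg : capSum bs a ≤ M := by
      rcases h2 with h | h
      · exact h
      · omega
    rcases h3' with h | h
    · omega
    · have := capSum_mono bs (show a' + 1 ≤ a by omega)
      omega

theorem le_getLast_of_pairwise :
    ∀ (l : List Int) (h : l ≠ []), l.Pairwise (· ≤ ·) → ∀ x ∈ l, x ≤ l.getLast h := by
  intro l
  induction l with
  | nil => intro h; exact absurd rfl h
  | cons b t ih =>
    intro _ hp x hx
    rcases List.pairwise_cons.mp hp with ⟨hb, ht⟩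
    rcases List.mem_cons.mp hx with rfl | hx
    · cases t with
      | nil => simp
      | cons c u =>
        rw [List.getLast_cons (by simp)]
        exact hb _ (List.getLast_mem (by simp))
    · have hne : t ≠ [] := by rintro rfl; simp at hx
      rw [List.getLast_cons hne]
      exact ih hne ht x hx

-- A's loop: binary-search invariant
theorem solGo_isAns_aux (budgets : List Int) (M mx : Int) (hmx : 0 ≤ mx) :
    ∀ (k : Nat) (lo hi ans : Int), (hi + 1 - lo).toNat ≤ k → 0 ≤ lo → lo ≤ hi + 1 → hi ≤ mx →
    ((ans = 0 ∧ lo = 0) ∨ (ans = lo - 1 ∧ 1 ≤ lo ∧ capSum budgets ans ≤ M)) →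
    (hi = mx ∨ M < capSum budgets (hi + 1)) →
    IsAns budgets M mx (solGo budgets M lo hi ans) := by
  intro k
  induction k with
  | zero =>
    intro lo hi ans hk h0 h1 h2 hinv hhi
    have hlt : ¬ lo ≤ hi := by omega
    rw [solGo, dif_neg hlt]
    have hlo : lo = hi + 1 := by omega
    rcases hinv with ⟨ha, hl⟩ | ⟨ha, hlo1, hg⟩
    · have hhi' : M < capSum budgets (hi + 1) := by
        rcases hhi with h' | h'
        · omega
        · exact h'
      subst ha
      refine ⟨le_refl 0, by omega, Or.inr rfl, Or.inr ?_⟩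
      calc M < capSum budgets (hi + 1) := hhi'
        _ ≤ capSum budgets (0 + 1) := capSum_mono budgets (by omega)
    · refine ⟨by omega, by omega, Or.inl hg, ?_⟩
      rcases hhi with h' | h'
      · left; omega
      · right; rw [show ans + 1 = hi + 1 by omega]; exact h'
  | succ k ih =>
    intro lo hi ans hk h0 h1 h2 hinv hhi
    by_cases hle : lo ≤ hi
    · have hmid := PySem.Int.floordiv_two_mid_bounds hle
      rw [solGo, dif_pos hle]
      simp only [foldl_capSum]
      set mid := PySem.Int.floordiv (lo + hi) 2 with hmiddef
      by_cases hs : capSum budgets mid ≤ M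
      · rw [if_pos hs]
        exact ih (mid + 1) hi mid (by omega) (by omega) (by omega) h2
          (Or.inr ⟨by ring, by omega, hs⟩) hhi
      · rw [if_neg hs]
        refine ih lo (mid - 1) ans (by omega) h0 (by omega) (by omega) hinv (Or.inr ?_)
        rw [show mid - 1 + 1 = mid by ring]
        omega
    · rw [solGo, dif_neg hle]
      have hlo : lo = hi + 1 := by omega
      rcases hinv with ⟨ha, hl⟩ | ⟨ha, hlo1, hg⟩
      · have hhi' : M < capSum budgets (hi + 1) := by
          rcases hhi with h' | h'
          · omega
          · exact h'
        subst ha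
        refine ⟨le_refl 0, by omega, Or.inr rfl, Or.inr ?_⟩
        calc M < capSum budgets (hi + 1) := hhi'
          _ ≤ capSum budgets (0 + 1) := capSum_mono budgets (by omega)
      · refine ⟨by omega, by omega, Or.inl hg, ?_⟩
        rcases hhi with h' | h'
        · left; omega
        · right; rw [show ans + 1 = hi + 1 by omega]; exact h'

theorem solGo_isAns (budgets : List Int) (M mx : Int) (hmx : 0 ≤ mx)
    (lo hi ans : Int) (h0 : 0 ≤ lo) (h1 : lo ≤ hi + 1) (h2 : hi ≤ mx)
    (hinv : (ans = 0 ∧ lo = 0) ∨ (ans = lo - 1 ∧ 1 ≤ lo ∧ capSum budgets ans ≤ M))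
    (hhi : hi = mx ∨ M < capSum budgets (hi + 1)) :
    IsAns budgets M mx (solGo budgets M lo hi ans) :=
  solGo_isAns_aux budgets M mx hmx (hi + 1 - lo).toNat lo hi ans (le_refl _) h0 h1 h2 hinv hhi

-- B's loop: scan invariant over the sorted list s = done ++ rest
theorem altGo_unc (s : List Int) (M mx : Int)
    (hs : s.Pairwise (· ≤ ·)) (hmax : ∀ x ∈ s, x ≤ mx) (hmem : mx ∈ s) :
    ∀ rest done, s = done ++ rest →
    (∀ d ∈ done, capSum s d ≤ M) →
    Unc s M mx (altGo M s.length rest done.length done.sum mx) := by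
  intro rest
  induction rest with
  | nil =>
    intro done hsplit hinv
    rw [altGo]
    have hm : mx ∈ done := by rw [hsplit, List.append_nil] at hmem; exact hmem
    exact ⟨le_refl mx, hinv mx hm, Or.inl rfl⟩
  | cons b rest ih =>
    intro done hsplit hinv
    rw [altGo]
    have hpw := hsplit ▸ hs
    rcases List.pairwise_append.mp hpw with ⟨hpd, hpbr, hcross⟩
    rcases List.pairwise_cons.mp hpbr with ⟨hbrest, _⟩
    have hcnt : (s.length : Int) - done.length = ((b :: rest).length : Int) := by
      rw [hsplit]; push_cast [List.length_append, List.length_cons]; ring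
    have hcntpos : (0:Int) < (s.length : Int) - done.length := by
      rw [hcnt]; push_cast [List.length_cons]; omega
    by_cases htrig : M < done.sum + b * ((s.length : Int) - done.length)
    · rw [if_pos htrig]
      obtain ⟨cnt, hcntdef⟩ : ∃ c : Int, (s.length : Int) - done.length = c := ⟨_, rfl⟩
      rw [hcntdef] at hcnt hcntpos htrig ⊢
      set F : Int := PySem.Int.floordiv (M - done.sum) cnt with hF
      have hFle : ∀ q : Int, q ≤ F ↔ q * cnt ≤ M - done.sum := by
        intro q; rw [hF]; exact PySem.Int.le_floordiv_iff_mul_le hcntpos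
      have hFlt : ∀ q : Int, F < q ↔ M - done.sum < q * cnt := by
        intro q; rw [hF]; exact PySem.Int.floordiv_lt_iff_lt_mul hcntpos
      have hFb : F < b := (hFlt b).mpr (by omega)
      have hbmx : b ≤ mx := hmax b (by rw [hsplit]; simp)
      -- every done element ≤ F (via the last element of done, which did not trigger)
      have hdone_le : ∀ d ∈ done, d ≤ F := by
        intro d hd
        have hne : done ≠ [] := by intro h; rw [h] at hd; simp at hd
        set dl := done.getLast hne with hdl
        have hdld : ∀ x ∈ done, x ≤ dl := le_getLast_of_pairwise done hne hpd
        have hdlmem : dl ∈ done := List.getLast_mem hne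
        have hgdl : capSum s dl ≤ M := hinv dl hdlmem
        have hsplitg : capSum s dl = done.sum + dl * ((b :: rest).length : Int) := by
          rw [hsplit]
          exact capSum_split done (b :: rest) dl hdld (fun e he => hcross dl hdlmem e he)
        have hmul : dl * cnt ≤ M - done.sum := by
          rw [hcnt]; omega
        exact le_trans (hdld d hd) ((hFle dl).mpr hmul)
      refine ⟨by omega, ?_, Or.inr ?_⟩
      · have hsp : capSum s F = done.sum + F * ((b :: rest).length : Int) := by
          rw [hsplit]
          refine capSum_split done (b :: rest) F hdone_le ?_
          intro e he
          rcases List.mem_cons.mp he with rfl | he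
          · omega
          · have := hbrest e he; omega
        have hFF : F * cnt ≤ M - done.sum := (hFle F).mp (le_refl F)
        rw [hsp]; rw [hcnt] at hFF; omega
      · have hsp : capSum s (F + 1) = done.sum + (F + 1) * ((b :: rest).length : Int) := by
          rw [hsplit]
          refine capSum_split done (b :: rest) (F + 1) (fun d hd => by have := hdone_le d hd; omega) ?_
          intro e he
          rcases List.mem_cons.mp he with rfl | he
          · omega
          · have := hbrest e he; omega
        have hlt : M - done.sum < (F + 1) * cnt := (hFlt (F + 1)).mp (by omega)
        rw [hsp]; rw [hcnt] at hlt; omega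
    · rw [if_neg htrig]
      push_neg at htrig
      have h1 : (((done ++ [b]).length : Nat) : Int) = (done.length : Int) + 1 := by
        simp
      have h2 : (done ++ [b]).sum = done.sum + b := by simp
      have hgoal := ih (done ++ [b]) (by rw [hsplit]; simp) ?_
      · rw [h1, h2] at hgoal
        exact hgoal
      intro d hd
      rcases List.mem_append.mp hd with hd | hd
      · exact hinv d hd
      · simp at hd
        subst hd
        have hsp : capSum s d = done.sum + d * ((d :: rest).length : Int) := by
          rw [hsplit]
          exact capSum_split done (d :: rest) d (fun x hx => hcross x hx d (by simp))
            (fun e he => by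
              rcases List.mem_cons.mp he with rfl | he
              · exact le_refl _
              · exact hbrest e he)
        rw [hcnt] at htrig
        rw [hsp]; exact htrig

theorem isAns_congr {bs cs : List Int} (hp : bs.Perm cs) {M mx a : Int}
    (h : IsAns bs M mx a) : IsAns cs M mx a := by
  obtain ⟨h0, h1, h2, h3⟩ := h
  refine ⟨h0, h1, ?_, ?_⟩
  · rw [capSum_perm hp.symm]; exact h2
  · rw [capSum_perm hp.symm]; exact h3

-- the clamped scan result satisfies A's characterisation (for mx ≥ 0)
theorem unc_clamp_isAns {bs : List Int} {M mx t : Int} (hmx : 0 ≤ mx)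
    (h : Unc bs M mx t) : IsAns bs M mx (max t 0) := by
  obtain ⟨h1, h2, h3⟩ := h
  by_cases ht : 0 ≤ t
  · have hm : max t 0 = t := by omega
    rw [hm]
    exact ⟨ht, h1, Or.inl h2, h3⟩
  · have hm : max t 0 = 0 := by omega
    rw [hm]
    refine ⟨le_refl 0, hmx, Or.inr rfl, ?_⟩
    rcases h3 with h3 | h3
    · omega
    · right
      calc M < capSum bs (t + 1) := h3
        _ ≤ capSum bs (0 + 1) := capSum_mono bs (by omega)

-- ===== VERDICT (by name: the statement is the Claim_ definition above) =====
theorem solution_spec : Claim_equal_solution := by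
  intro budgets M _ hpre
  unfold Spec_solution Pre_solution at *
  set s := PySem.List.sorted budgets (fun x => x) false with hsdef
  have hne : s ≠ [] := by
    rw [hsdef]
    simpa [PySem.List.sorted_eq_nil_iff] using hpre
  have hperm : s.Perm budgets := PySem.List.sorted_perm budgets (fun x => x) false
  have hpw : s.Pairwise (· ≤ ·) := PySem.List.sorted_pairwise budgets (fun x => x)
  set mx := s.getLast hne with hmxdef
  have hget : PySem.List.pyGet? s (-1) = some mx := by
    rw [PySem.List.pyGet?_neg_one, List.getLast?_eq_some_getLast hne]
  have hmem : mx ∈ s := List.getLast_mem hne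
  have hmax : ∀ x ∈ s, x ≤ mx := le_getLast_of_pairwise s hne hpw
  obtain ⟨mA, hmA⟩ : ∃ mA, PySem.List.max? budgets (fun x => x) = some mA := by
    cases h : PySem.List.max? budgets (fun x => x) with
    | none => exact absurd (Iff.mp (PySem.List.max?_eq_none_iff budgets (fun x => x)) h) hpre
    | some m => exact ⟨m, rfl⟩
  have hmAmem : mA ∈ budgets := PySem.List.max?_mem hmA
  have hmAmax : ∀ y ∈ budgets, y ≤ mA := PySem.List.max?_isMax hmA
  have hmAmx : mA = mx := by
    apply le_antisymm
    · exact hmax mA (hperm.mem_iff.mpr hmAmem)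
    · exact hmAmax mx (hperm.mem_iff.mp hmem)
  have hA : solution budgets M = solGo budgets M 0 mx 0 := by
    simp only [solution]
    rw [hmA, hmAmx]
  have hB : solution_alt budgets M = max (altGo M s.length s 0 0 mx) 0 := by
    simp only [solution_alt]
    rw [← hsdef, hget]
  rw [hA, hB]
  have hBunc : Unc s M mx (altGo M s.length s 0 0 mx) := by
    have := altGo_unc s M mx hpw hmax hmem s [] (by simp) (by simp)
    simpa using this
  by_cases hmx : mx < 0
  · -- A's search range [0, mx] is empty: A returns 0; B's scan result is ≤ mx < 0, clamped to 0
    rw [solGo]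
    simp only [dif_neg (by omega : ¬ (0:Int) ≤ mx)]
    have := hBunc.1
    omega
  · push_neg at hmx
    have hAans : IsAns budgets M mx (solGo budgets M 0 mx 0) :=
      solGo_isAns budgets M mx hmx 0 mx 0 (by omega) (by omega) (le_refl mx)
        (Or.inl ⟨rfl, rfl⟩) (Or.inl rfl)
    have hBans : IsAns budgets M mx (max (altGo M s.length s 0 0 mx) 0) :=
      isAns_congr hperm (unc_clamp_isAns hmx hBunc)
    exact isAns_unique hAans hBans
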